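-- pv_equiv track=rewrite | github.com/npv2k1/zcode_python | PY01022.py | solve
-- ===== SOURCE A (Python) =====
-- def solve(n: str):
--     n = n.strip()
--     n = n.lstrip('-')
--     step = 0
--     while True:
--         s = 0
--         for i in n:
--             s += int(i)
--         n = str(s)
--         step += 1
--         if(len(n) == 1):
--             break
--     return step
-- ===== SOURCE B (Python) =====
-- def dsum(s: int) -> int:
--     # recursive digit sum by arithmetic (no str() round trip)
--     return 0 if s == 0 else s % 10 + dsum(s // 10)
--
--
-- def persist(s: int) -> int:
--     # additive persistence of the integer s, counting the already-done first pass
--     return 1 if s < 10 else 1 + persist(dsum(s))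
--
--
-- def solve(n: str):
--     n = n.strip()
--     n = n.lstrip('-')
--     return persist(sum(int(c) for c in n))
-- ===== Notes on version B (the rewrite author's own statement) =====
-- stated objective: alternative
-- what changed: A is an imperative while-loop that on every iteration re-stringifies the running sum with str() and re-parses each character with int(), counting passes in a mutable step counter; B parses the string once and then works purely recursively on integers: a recursive arithmetic digit sum (s%10 + dsum(s//10)) and a recursive persist that returns 1 or 1 + persist(dsum(s)), with no loop, no counter variable and no string round trips.
import Mathlib
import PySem

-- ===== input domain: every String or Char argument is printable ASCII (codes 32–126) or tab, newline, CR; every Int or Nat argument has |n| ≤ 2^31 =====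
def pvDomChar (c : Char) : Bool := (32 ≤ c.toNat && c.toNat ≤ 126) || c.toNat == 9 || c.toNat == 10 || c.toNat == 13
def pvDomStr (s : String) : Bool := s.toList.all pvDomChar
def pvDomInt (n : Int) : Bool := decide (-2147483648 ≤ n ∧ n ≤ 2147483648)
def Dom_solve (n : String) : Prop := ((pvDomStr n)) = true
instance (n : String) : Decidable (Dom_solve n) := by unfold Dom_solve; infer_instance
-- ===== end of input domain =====

-- B replaces A's imperative string-based loop (str()/int() round trip per pass, mutable
-- step counter) by a purely recursive arithmetic computation (objective: alternative).

-- ===== PORT A =====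
-- `int(i)` for the one-character string `i`; the `.getD 0` default is unreachable under
-- Pre_solve (Python raises ValueError exactly there).
def pvCharVal (c : Char) : Int := (PySem.Int.ofChars? [c]).getD 0

-- A's inner `for i in n: s += int(i)` pass.
def pvDigitSum (cs : List Char) : Int := cs.foldl (fun s c => s + pvCharVal c) 0

-- A's `while True` loop (s = digit sum, n' = str(s), step counted by `1 +`); the fuel
-- argument only makes the recursion total — `solve` passes enough fuel for every input
-- Pre_solve admits — it switches no algorithm.
def pvLoopA : Nat → List Char → Int
  | 0, _ => 0
  | fuel+1, cs =>
      if (PySem.Int.toChars (pvDigitSum cs)).length = 1 then 1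
      else 1 + pvLoopA fuel (PySem.Int.toChars (pvDigitSum cs))

def solve (n : String) : Int :=
  -- n.strip() then n.lstrip('-'): dropWhile is exactly lstrip with the one-char set {'-'}
  let cs := List.dropWhile (· == '-') (PySem.Chars.strip n.toList)
  pvLoopA ((pvDigitSum cs).toNat + 1) cs

-- ===== PORT B =====
-- Source B's `dsum`: recursive arithmetic digit sum (on nonnegative ints Python's % and //
-- agree with Nat's)
def pvSumDig (s : Nat) : Nat :=
  if h : s = 0 then 0 else s % 10 + pvSumDig (s / 10)
decreasing_by exact Nat.div_lt_self (Nat.pos_of_ne_zero h) (by norm_num)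

theorem pvSumDig_le (s : Nat) : pvSumDig s ≤ s := by
  induction s using Nat.strong_induction_on with
  | _ s ih =>
    rw [pvSumDig]
    split
    · omega
    · rename_i h
      have h1 : s / 10 < s := Nat.div_lt_self (Nat.pos_of_ne_zero h) (by norm_num)
      have := ih (s / 10) h1
      omega

-- cited by pvPersist's decreasing_by
theorem pvSumDig_lt (s : Nat) (h : 10 ≤ s) : pvSumDig s < s := by
  rw [pvSumDig]
  split
  · omega
  · have h1 : s / 10 < s := Nat.div_lt_self (by omega) (by norm_num)
    have := pvSumDig_le (s / 10)
    omega

-- Source B's `persist`: 1 if s < 10 else 1 + persist (dsum s)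
def pvPersist (s : Nat) : Int :=
  if s < 10 then 1 else 1 + pvPersist (pvSumDig s)
decreasing_by exact pvSumDig_lt s (by omega)

def solve_alt (n : String) : Int :=
  -- n.strip().lstrip('-') as in Source B
  let cs := List.dropWhile (· == '-') (PySem.Chars.strip n.toList)
  -- sum(int(c) for c in n)
  let s := cs.foldl (fun s c => s + (PySem.Int.ofChars? [c]).getD 0) 0
  -- under Pre_solve s ≥ 0, so persist runs on s.toNat
  pvPersist s.toNat

-- ===== PRECONDITION & SPEC =====
-- Pre_solve excludes exactly the inputs on which Python A raises ValueError: a non-digit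
-- character left after strip() and lstrip('-').
def Pre_solve (n : String) : Prop :=
  (List.dropWhile (· == '-') (PySem.Chars.strip n.toList)).all (·.isDigit) = true
instance (n : String) : Decidable (Pre_solve n) := by unfold Pre_solve; infer_instance

def pvWitness_solve : String := " 1903"

def Spec_solve (n : String) (out : Int) : Prop := out = solve_alt n
instance (n : String) (out : Int) : Decidable (Spec_solve n out) := by unfold Spec_solve; infer_instance

-- ===== CLAIM (what is proved, stated in full; the proofs are below) =====
def Claim_equal_solve : Prop := ∀ (n : String), Dom_solve n → Pre_solve n → Spec_solve n (solve n)

-- ===== LEMMAS AND PROOFS =====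

theorem pvFoldl_shift (f : Char → Int) (cs : List Char) (a : Int) :
    cs.foldl (fun s c => s + f c) a = a + cs.foldl (fun s c => s + f c) 0 := by
  induction cs generalizing a with
  | nil => simp
  | cons c cs ih => simp only [List.foldl_cons]; rw [ih (a + f c), ih (0 + f c)]; ring

theorem pvDigitSum_cons (c : Char) (cs : List Char) :
    pvDigitSum (c :: cs) = pvCharVal c + pvDigitSum cs := by
  simp only [pvDigitSum, List.foldl_cons]
  rw [pvFoldl_shift _ _ (0 + pvCharVal c)]
  ring

theorem pvDigit_mem (c : Char) (h : c.isDigit = true) :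
    c ∈ ['0','1','2','3','4','5','6','7','8','9'] := by
  have h1 : 48 ≤ c.toNat ∧ c.toNat ≤ 57 := by
    simp only [Char.isDigit, Bool.and_eq_true, decide_eq_true_eq] at h
    exact ⟨h.1, h.2⟩
  have hc : c = Char.ofNat c.toNat := (Char.ofNat_toNat c).symm
  obtain ⟨ha, hb⟩ := h1
  interval_cases hn : c.toNat <;> rw [hc] <;> decide

theorem pvCharVal_nonneg (c : Char) (h : c.isDigit = true) : 0 ≤ pvCharVal c := by
  have := pvDigit_mem c h
  fin_cases this <;> decide

theorem pvDigitSum_nonneg (cs : List Char) (h : ∀ c ∈ cs, c.isDigit = true) :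
    0 ≤ pvDigitSum cs := by
  induction cs with
  | nil => simp [pvDigitSum]
  | cons c cs ih =>
    rw [pvDigitSum_cons]
    have h1 := pvCharVal_nonneg c (h c (List.mem_cons_self ..))
    have h2 := ih (fun d hd => h d (List.mem_cons_of_mem _ hd))
    omega

-- parse value of the digit characters Nat.toDigits emits
theorem pvCharVal_digitChar (d : Nat) (h : d < 10) :
    pvCharVal (Nat.digitChar d) = (d : Int) := by
  interval_cases d <;> decide

-- digit sum (as A computes it, by parsing characters) of Nat.toDigitsCore output
theorem pvDigitSum_toDigitsCore (fuel : Nat) :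
    ∀ (m : Nat) (ds : List Char), m < fuel →
      pvDigitSum (Nat.toDigitsCore 10 fuel m ds) = (pvSumDig m : Int) + pvDigitSum ds := by
  induction fuel with
  | zero => intro m ds h; omega
  | succ fuel ih =>
    intro m ds _
    rw [Nat.toDigitsCore]
    by_cases h10 : m / 10 = 0
    · rw [if_pos h10, pvDigitSum_cons, pvCharVal_digitChar _ (Nat.mod_lt _ (by norm_num))]
      have hs : pvSumDig m = m % 10 := by
        by_cases hm0 : m = 0
        · subst hm0; rw [pvSumDig]; simp
        · rw [pvSumDig, dif_neg hm0, h10, pvSumDig]; simp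
      rw [hs]
    · rw [if_neg h10]
      have hm : m ≠ 0 := by
        intro hz; subst hz; simp at h10
      have hlt : m / 10 < fuel := by
        have := Nat.div_lt_self (Nat.pos_of_ne_zero hm) (by norm_num : 1 < 10)
        omega
      rw [ih (m / 10) _ hlt, pvDigitSum_cons,
          pvCharVal_digitChar _ (Nat.mod_lt _ (by norm_num))]
      have hs : pvSumDig m = m % 10 + pvSumDig (m / 10) := by
        rw [pvSumDig, dif_neg hm]
      rw [hs]
      push_cast
      ring

-- length facts used for A's `len(n) == 1` test
theorem pvToDigitsCore_len_ge (fuel : Nat) :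
    ∀ (m : Nat) (ds : List Char), m < fuel →
      ds.length + 1 ≤ (Nat.toDigitsCore 10 fuel m ds).length := by
  induction fuel with
  | zero => intro m ds h; omega
  | succ fuel ih =>
    intro m ds _
    rw [Nat.toDigitsCore]
    by_cases h10 : m / 10 = 0
    · simp [h10]
    · rw [if_neg h10]
      have hm : m ≠ 0 := by intro hz; subst hz; simp at h10
      have hlt : m / 10 < fuel := by
        have := Nat.div_lt_self (Nat.pos_of_ne_zero hm) (by norm_num : 1 < 10)
        omega
      have := ih (m / 10) (Nat.digitChar (m % 10) :: ds) hlt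
      simp only [List.length_cons] at this
      omega

theorem pvToDigits_len_one (m : Nat) :
    (Nat.toDigits 10 m).length = 1 ↔ m < 10 := by
  constructor
  · intro h
    by_contra h10
    push Not at h10
    rw [Nat.toDigits, Nat.toDigitsCore] at h
    have hne : m / 10 ≠ 0 := (Nat.div_pos h10 (by norm_num)).ne'
    rw [if_neg hne] at h
    have := pvToDigitsCore_len_ge m (m / 10) [Nat.digitChar (m % 10)]
      (Nat.lt_of_lt_of_le (Nat.div_lt_self (by omega) (by norm_num)) (by omega))
    simp only [List.length_cons, List.length_nil] at this
    omega
  · intro h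
    rw [Nat.toDigits, Nat.toDigitsCore]
    have h10 : m / 10 = 0 := Nat.div_eq_of_lt h
    simp [h10]

-- toChars of a nonnegative Int is Nat.toDigits of its toNat
theorem pvToChars_nonneg (s : Int) (h : 0 ≤ s) :
    PySem.Int.toChars s = Nat.toDigits 10 s.toNat := by
  simp [PySem.Int.toChars, not_lt.mpr h]

-- the main loop equivalence: A's string loop computes B's recursive persist
theorem pvLoopA_eq (fuel : Nat) :
    ∀ (s : Nat) (cs : List Char), pvDigitSum cs = (s : Int) → s < fuel →
      pvLoopA fuel cs = pvPersist s := by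
  induction fuel with
  | zero => intro s cs _ h; omega
  | succ fuel ih =>
    intro s cs hsum _
    rw [pvLoopA, hsum, pvToChars_nonneg _ (Int.natCast_nonneg s), Int.toNat_natCast]
    by_cases h10 : s < 10
    · rw [if_pos ((pvToDigits_len_one s).mpr h10), pvPersist, if_pos h10]
    · rw [if_neg (by rw [pvToDigits_len_one]; omega)]
      have hnext : pvDigitSum (Nat.toDigits 10 s) = (pvSumDig s : Int) := by
        rw [Nat.toDigits, pvDigitSum_toDigitsCore (s + 1) s [] (by omega)]
        simp [pvDigitSum]
      have hlt : pvSumDig s < s := pvSumDig_lt s (by omega)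
      rw [ih (pvSumDig s) _ hnext (by omega)]
      conv_rhs => rw [pvPersist]
      rw [if_neg h10]

-- ===== VERDICT (by name: the statement is the Claim_ definition above) =====
theorem solve_spec : Claim_equal_solve := by
  intro n _ hpre
  unfold Spec_solve solve solve_alt
  simp only
  have hnn : 0 ≤ pvDigitSum (List.dropWhile (· == '-') (PySem.Chars.strip n.toList)) :=
    pvDigitSum_nonneg _ (by unfold Pre_solve at hpre; simpa [List.all_eq_true] using hpre)
  have hsum : ((List.dropWhile (· == '-') (PySem.Chars.strip n.toList)).foldl
      (fun s c => s + (PySem.Int.ofChars? [c]).getD 0) 0)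
      = pvDigitSum (List.dropWhile (· == '-') (PySem.Chars.strip n.toList)) := rfl
  rw [hsum]
  exact pvLoopA_eq _ _ _ (Int.toNat_of_nonneg hnn).symm (by omega)
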